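-- pv_equiv track=rewrite | github.com/kyw0716/coding-test | practice 1 ( string )/비밀번호 발음하기.py | aeiou
-- ===== SOURCE A (Python) =====
-- def aeiou(testCase):
--     gather = "aeiou"
--     find = 0
--     for g in gather:
--         if testCase.find(g) == -1:
--             find += 1
--     if find == 5:
--         return "not acceptable"
--     else :
--         return "acceptable"
-- ===== SOURCE B (Python) =====
-- def aeiou(testCase):
--     return "acceptable" if any(c in "aeiou" for c in testCase) else "not acceptable"
-- ===== Notes on version B (the rewrite author's own statement) =====
-- stated objective: idiomatic
-- what changed: Instead of five whole-string scans (one per vowel) counting absent vowels, B makes a single short-circuiting pass over the input checking each character against the vowel string.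
import Mathlib
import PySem

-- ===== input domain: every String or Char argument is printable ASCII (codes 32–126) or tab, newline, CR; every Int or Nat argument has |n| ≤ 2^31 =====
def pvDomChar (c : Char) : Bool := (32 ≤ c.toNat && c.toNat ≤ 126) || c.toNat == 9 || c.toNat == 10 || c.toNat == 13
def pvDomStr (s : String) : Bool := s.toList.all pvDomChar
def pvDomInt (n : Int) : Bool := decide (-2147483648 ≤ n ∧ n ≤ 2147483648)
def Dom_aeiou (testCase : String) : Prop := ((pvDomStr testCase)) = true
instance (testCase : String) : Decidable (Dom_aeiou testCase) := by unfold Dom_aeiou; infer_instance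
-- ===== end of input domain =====

-- B replaces A's five whole-string vowel scans by one pass over the input (idiomatic any()).
-- ===== PORT A =====
def aeiou (testCase : String) : String :=
  let gather := "aeiou"
  let find := gather.toList.foldl
    (fun find g => if PySem.Str.find testCase (String.mk [g]) = -1 then find + 1 else find) 0
  if find = 5 then "not acceptable" else "acceptable"

-- ===== PORT B =====
-- 'c in "aeiou"' on a single character is exactly membership of c in the vowel characters
def aeiou_alt (testCase : String) : String :=
  if testCase.toList.any (fun c => "aeiou".toList.contains c) then "acceptable"
  else "not acceptable"

-- ===== PRECONDITION & SPEC =====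
def Spec_aeiou (testCase : String) (out : String) : Prop := out = aeiou_alt testCase
instance (testCase : String) (out : String) : Decidable (Spec_aeiou testCase out) := by unfold Spec_aeiou; infer_instance

-- ===== CLAIM (what is proved, stated in full; the proofs are below) =====
def Claim_equal_aeiou : Prop := ∀ (testCase : String), Dom_aeiou testCase → Spec_aeiou testCase (aeiou testCase)

-- ===== LEMMAS AND PROOFS =====
theorem toList_mk (l : List Char) : (String.mk l).toList = l :=
  Eq.symm (String.ofList_eq.mp rfl)

theorem find_single_eq_neg_one_iff (t : List Char) (g : Char) :
    PySem.Chars.find t [g] = -1 ↔ g ∉ t := by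
  rw [PySem.Chars.find_eq_neg_one_iff]
  simp [List.singleton_infix_iff]

-- ===== VERDICT (by name: the statement is the Claim_ definition above) =====
set_option maxRecDepth 4000 in
theorem aeiou_spec : Claim_equal_aeiou := by
  intro t _
  unfold Spec_aeiou aeiou aeiou_alt
  by_cases ha : 'a' ∈ t.toList <;> by_cases he : 'e' ∈ t.toList <;>
    by_cases hi : 'i' ∈ t.toList <;> by_cases ho : 'o' ∈ t.toList <;>
    by_cases hu : 'u' ∈ t.toList <;>
  · simp [toList_mk, find_single_eq_neg_one_iff, ha, he, hi, ho, hu] <;>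
      first
        | exact ⟨'a', ha, by decide⟩
        | exact ⟨'e', he, by decide⟩
        | exact ⟨'i', hi, by decide⟩
        | exact ⟨'o', ho, by decide⟩
        | exact ⟨'u', hu, by decide⟩
        | exact fun x hx => ⟨fun h => ha (h ▸ hx), fun h => he (h ▸ hx),
            fun h => hi (h ▸ hx), fun h => ho (h ▸ hx), fun h => hu (h ▸ hx)⟩
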